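-- pv_equiv track=rewrite | github.com/AntLrc/ai-models | ai_models/pp_stepper.py | PPstepping
-- ===== SOURCE A (Python) =====
-- def PPstepping(steps, lead_times):
--     """
--     This function computes the different steps needed to
--     get to lead_time with PanguWeather.
--     """
--     res = {}
--     for lead_time in lead_times:
--         mem = 0
--         lt = lead_time
--         res_lt = [0]
--         for step in steps[::-1]:
--             while lead_time > 0 and lead_time >= step:
--                 res_lt.append(step + mem)
--                 mem = res_lt[-1]
--                 lead_time -= step
--         res[lt] = res_lt
--     return res
-- ===== SOURCE B (Python) =====
-- def PPstepping(steps, lead_times):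
--     """
--     This function computes the different steps needed to
--     get to lead_time with PanguWeather.
--     """
--     res = {}
--     for lt in lead_times:
--         remaining = lt
--         mem = 0
--         cum = [0]
--         for step in reversed(steps):
--             if step > 0 and remaining >= step:
--                 q = remaining // step
--                 remaining -= q * step
--                 cum.extend(range(mem + step, mem + q * step + 1, step))
--                 mem += q * step
--         res[lt] = cum
--     return res
-- ===== Notes on version B (the rewrite author's own statement) =====
-- stated objective: alternative
-- what changed: The per-unit while-subtraction loop (one append and one subtraction per increment) is replaced by a single floor division per step plus a C-level range() extension producing the same cumulative values arithmetically.
-- outside the precondition, e.g. on PPstepping([-1, 6], [6]): A returns {6: [0, 6]}, B returns {6: [0, 6]}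
import Mathlib
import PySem

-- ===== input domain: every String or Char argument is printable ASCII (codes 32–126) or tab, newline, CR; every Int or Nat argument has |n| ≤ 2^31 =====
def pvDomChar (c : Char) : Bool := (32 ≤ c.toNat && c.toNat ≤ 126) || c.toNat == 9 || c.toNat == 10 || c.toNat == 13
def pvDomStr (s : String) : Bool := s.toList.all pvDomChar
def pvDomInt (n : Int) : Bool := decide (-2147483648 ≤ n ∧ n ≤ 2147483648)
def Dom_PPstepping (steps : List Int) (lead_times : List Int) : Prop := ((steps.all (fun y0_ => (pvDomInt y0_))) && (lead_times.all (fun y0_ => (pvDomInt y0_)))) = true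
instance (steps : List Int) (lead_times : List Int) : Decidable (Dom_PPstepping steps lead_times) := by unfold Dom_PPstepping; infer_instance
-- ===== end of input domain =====

-- ===== PORT A =====
-- B replaces A's per-unit while-subtraction loop by one floor division plus a range extension per step (objective: alternative); return values proved equal on Pre_.
-- inner 'while lead_time > 0 and lead_time >= step: …' of A, run with enough fuel under Pre_
def pvAWhile (step : Int) : Nat → Int × Int × List Int → Int × Int × List Int
  | 0, st => st
  | f+1, (mem, lt, acc) =>
    if lt > 0 ∧ lt ≥ step then pvAWhile step f (step + mem, lt - step, acc ++ [step + mem])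
    else (mem, lt, acc)

def PPstepping (steps : List Int) (lead_times : List Int) : List (Int × List Int) :=
  (lead_times.foldl (fun (res : PySem.Dict Int (List Int)) lead_time =>
      let rev := (PySem.List.slice? steps none none (-1)).getD []   -- steps[::-1]
      let st := rev.foldl (fun st step => pvAWhile step st.2.1.toNat st) (0, lead_time, [0])
      res.insert lead_time st.2.2)
    PySem.Dict.empty).items

-- ===== PORT B =====
def PPstepping_alt (steps : List Int) (lead_times : List Int) : List (Int × List Int) :=
  (lead_times.foldl (fun (res : PySem.Dict Int (List Int)) lt =>
      let fin := steps.reverse.foldl (fun (st : Int × Int × List Int) step =>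
          if step > 0 ∧ st.1 ≥ step then
            let q := PySem.Int.floordiv st.1 step
            (st.1 - q * step, st.2.1 + q * step,
             st.2.2 ++ PySem.List.pyRange (st.2.1 + step) (st.2.1 + q * step + 1) step)
          else st)
        (lt, 0, [0])
      res.insert lt fin.2.2)
    PySem.Dict.empty).items

-- ===== PRECONDITION & SPEC =====
-- Pre_ excludes inputs that combine a nonpositive step with a positive lead time, where A's inner
-- while loop can fail to terminate; it is slightly narrower than exact termination, so on a few such
-- inputs A still returns (and B agrees there) — see the cites in claim.json.
def Pre_PPstepping (steps : List Int) (lead_times : List Int) : Prop :=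
  (∀ s ∈ steps, 0 < s) ∨ (∀ l ∈ lead_times, l ≤ 0)
instance (steps : List Int) (lead_times : List Int) : Decidable (Pre_PPstepping steps lead_times) := by
  unfold Pre_PPstepping; infer_instance
def pvWitness_PPstepping : List Int × List Int := ([6, 1], [7, 0, -2])

def Spec_PPstepping (steps : List Int) (lead_times : List Int) (out : List (Int × List Int)) : Prop := out = PPstepping_alt steps lead_times
instance (steps : List Int) (lead_times : List Int) (out : List (Int × List Int)) : Decidable (Spec_PPstepping steps lead_times out) := by unfold Spec_PPstepping; infer_instance

-- ===== CLAIM (what is proved, stated in full; the proofs are below) =====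
def Claim_equal_PPstepping : Prop := ∀ (steps : List Int) (lead_times : List Int), Dom_PPstepping steps lead_times → Pre_PPstepping steps lead_times → Spec_PPstepping steps lead_times (PPstepping steps lead_times)

-- ===== LEMMAS AND PROOFS =====

-- the value B's per-step branch produces (proof-only closed form of one pass of A's while loop)
def pvB1 (s : Int) (st : Int × Int × List Int) : Int × Int × List Int :=
  -- st = (mem, remaining, acc), A's state order
  if s ≤ st.2.1 then
    (st.1 + PySem.Int.floordiv st.2.1 s * s, st.2.1 - PySem.Int.floordiv st.2.1 s * s,
     st.2.2 ++ PySem.List.pyRange (st.1 + s) (st.1 + PySem.Int.floordiv st.2.1 s * s + 1) s)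
  else st

lemma pvRange_closed (m s : Int) (hs : 0 < s) (q : Nat) :
    PySem.List.pyRange (m + s) (m + (q : Int) * s + 1) s
      = (List.range q).map (fun (k : Nat) => m + s + s * (k : Int)) := by
  rw [PySem.List.pyRange_of_pos _ _ hs]
  rcases Nat.eq_zero_or_pos q with hq | hq
  · subst hq
    have hnlt : ¬ (m + s < m + ((0 : Nat) : Int) * s + 1) := by push_cast; omega
    rw [if_neg hnlt]
  · have hlt : m + s < m + (q : Int) * s + 1 := by nlinarith [hq, hs]
    have hcount : ((m + (q : Int) * s + 1 - (m + s) + s - 1) / s).toNat = q := by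
      have he : m + (q : Int) * s + 1 - (m + s) + s - 1 = (q : Int) * s := by ring
      rw [he, Int.mul_ediv_cancel _ (by omega)]
      simp
    rw [if_pos hlt, hcount]

lemma pvConsMapRange (n : Nat) (mem s : Int) :
    (s + mem) :: (List.range n).map (fun (k : Nat) => s + mem + s + s * (k : Int))
      = (List.range (n + 1)).map (fun (k : Nat) => mem + s + s * (k : Int)) := by
  rw [List.range_succ_eq_map, List.map_cons, List.map_map]
  congr 1
  · push_cast; ring
  · apply List.map_congr_left
    intro k _
    simp only [Function.comp]
    push_cast
    ring

lemma pvB1_step (s : Int) (hs : 0 < s) (mem rem : Int) (acc : List Int) (h : s ≤ rem) :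
    pvB1 s (s + mem, rem - s, acc ++ [s + mem]) = pvB1 s (mem, rem, acc) := by
  have hs' : s ≠ 0 := by omega
  have hq : PySem.Int.floordiv rem s = rem / s := PySem.Int.floordiv_eq_ediv_of_pos hs
  have hq' : PySem.Int.floordiv (rem - s) s = rem / s - 1 := by
    rw [PySem.Int.floordiv_eq_ediv_of_pos hs]
    have he : rem - s = rem + (-1) * s := by ring
    rw [he, Int.add_mul_ediv_right _ _ hs']
    ring
  have h1 : (1 : Int) ≤ rem / s := by
    rw [Int.le_ediv_iff_mul_le hs]; omega
  unfold pvB1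
  by_cases h2 : s ≤ rem - s
  · have hq2 : (2 : Int) ≤ rem / s := by
      rw [Int.le_ediv_iff_mul_le hs]; omega
    rw [if_pos h2, if_pos h]
    simp only [hq, hq', Prod.mk.injEq]
    refine ⟨by ring, by ring, ?_⟩
    have hqnat : (((rem / s).toNat : Int)) = rem / s := Int.toNat_of_nonneg (by omega)
    have hq1 : (((rem / s - 1).toNat : Int)) = rem / s - 1 := Int.toNat_of_nonneg (by omega)
    have r1 : PySem.List.pyRange (s + mem + s) (s + mem + (rem / s - 1) * s + 1) s
        = (List.range (rem / s - 1).toNat).map (fun (k : Nat) => s + mem + s + s * (k : Int)) := by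
      have hcl := pvRange_closed (s + mem) s hs (rem / s - 1).toNat
      rwa [hq1] at hcl
    have r2 : PySem.List.pyRange (mem + s) (mem + rem / s * s + 1) s
        = (List.range (rem / s).toNat).map (fun (k : Nat) => mem + s + s * (k : Int)) := by
      have hcl := pvRange_closed mem s hs (rem / s).toNat
      rwa [hqnat] at hcl
    rw [r1, r2, List.append_assoc, List.singleton_append,
        show (rem / s).toNat = (rem / s - 1).toNat + 1 by omega]
    congr 1
    exact pvConsMapRange (rem / s - 1).toNat mem s
  · -- exactly one subtraction: rem / s = 1
    have hq2 : rem / s ≤ 1 := by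
      by_contra hcon
      have h2' : (2 : Int) ≤ rem / s := by omega
      rw [Int.le_ediv_iff_mul_le hs] at h2'
      omega
    have hqe : rem / s = 1 := le_antisymm hq2 h1
    rw [if_neg h2, if_pos h]
    simp only [hq, hqe, Prod.mk.injEq]
    refine ⟨by ring, by ring, ?_⟩
    have r2 : PySem.List.pyRange (mem + s) (mem + 1 * s + 1) s = [mem + s] := by
      have hcl := pvRange_closed mem s hs 1
      push_cast at hcl
      rw [hcl]
      simp
    rw [show mem + 1 * s + 1 = mem + ((1 : Nat) : Int) * s + 1 by push_cast; ring] at r2 ⊢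
    rw [r2]
    congr 1
    ring_nf

lemma pvAWhile_eq_pvB1 (s : Int) (hs : 0 < s) :
    ∀ (fuel : Nat) (rem mem : Int) (acc : List Int), rem.toNat ≤ fuel →
      pvAWhile s fuel (mem, rem, acc) = pvB1 s (mem, rem, acc) := by
  intro fuel
  induction fuel with
  | zero =>
    intro rem mem acc hf
    have hc : ¬ s ≤ rem := by omega
    simp [pvAWhile, pvB1, hc]
  | succ f ih =>
    intro rem mem acc hf
    by_cases hc : s ≤ rem
    · have hcond : rem > 0 ∧ rem ≥ s := ⟨by omega, hc⟩
      simp only [pvAWhile, if_pos hcond]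
      have hfr : (rem - s).toNat ≤ f := by omega
      rw [ih (rem - s) (s + mem) (acc ++ [s + mem]) hfr]
      exact pvB1_step s hs mem rem acc hc
    · have hcond : ¬ (rem > 0 ∧ rem ≥ s) := by
        intro hx; exact hc hx.2
      simp [pvAWhile, pvB1, hc]

-- one inner fold: A's fold over the reversed steps equals B's, given Pre_'s per-lead-time condition
lemma pvInner_eq (rev : List Int) :
    ∀ (rem mem : Int) (acc : List Int), ((∀ s ∈ rev, 0 < s) ∨ rem ≤ 0) →
      rev.foldl (fun st step => pvAWhile step st.2.1.toNat st) (mem, rem, acc)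
        = (fun st : Int × Int × List Int => (st.2.1, st.1, st.2.2))
            (rev.foldl (fun (st : Int × Int × List Int) step =>
                if step > 0 ∧ st.1 ≥ step then
                  let q := PySem.Int.floordiv st.1 step
                  (st.1 - q * step, st.2.1 + q * step,
                   st.2.2 ++ PySem.List.pyRange (st.2.1 + step) (st.2.1 + q * step + 1) step)
                else st) (rem, mem, acc)) := by
  induction rev with
  | nil => intro rem mem acc _; rfl
  | cons s rest ih =>
    intro rem mem acc hpre
    simp only [List.foldl_cons]
    by_cases hs : 0 < s
    · rw [pvAWhile_eq_pvB1 s hs rem.toNat rem mem acc (le_refl _)]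
      unfold pvB1
      by_cases hc : s ≤ rem
      · have hc' : s > 0 ∧ rem ≥ s := ⟨hs, hc⟩
        simp only [hc, if_pos, hc', true_and]
        apply ih
        rcases hpre with h | h
        · exact Or.inl (fun t ht => h t (List.mem_cons_of_mem _ ht))
        · omega
      · have hc' : ¬ (s > 0 ∧ rem ≥ s) := fun hx => hc hx.2
        rw [if_neg hc, if_neg hc']
        apply ih
        rcases hpre with h | h
        · exact Or.inl (fun t ht => h t (List.mem_cons_of_mem _ ht))
        · exact Or.inr h
    · -- nonpositive step: Pre_ forces rem ≤ 0, both sides skip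
      have hrem : rem ≤ 0 := by
        rcases hpre with h | h
        · exact absurd (h s List.mem_cons_self) hs
        · exact h
      have hA : rem.toNat = 0 := by omega
      have hc' : ¬ (s > 0 ∧ rem ≥ s) := fun hx => hs hx.1
      rw [hA]
      simp only [pvAWhile, if_neg hc']
      apply ih
      exact Or.inr hrem

-- ===== VERDICT (by name: the statement is the Claim_ definition above) =====
theorem PPstepping_spec : Claim_equal_PPstepping := by
  intro steps lead_times _ hpre
  unfold Spec_PPstepping PPstepping PPstepping_alt
  rw [PySem.List.slice?_none_none_neg_one]
  simp only [Option.getD_some]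
  have hrev : ∀ s ∈ steps.reverse, 0 < s → True := fun _ _ _ => trivial
  suffices h : ∀ (lts : List Int) (res : PySem.Dict Int (List Int)),
      ((∀ s ∈ steps, 0 < s) ∨ (∀ l ∈ lts, l ≤ 0)) →
      (lts.foldl (fun res lead_time =>
        let st := steps.reverse.foldl (fun st step => pvAWhile step st.2.1.toNat st) (0, lead_time, [0])
        res.insert lead_time st.2.2) res)
      = (lts.foldl (fun res lt =>
        let fin := steps.reverse.foldl (fun (st : Int × Int × List Int) step =>
          if step > 0 ∧ st.1 ≥ step then
            let q := PySem.Int.floordiv st.1 step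
            (st.1 - q * step, st.2.1 + q * step,
             st.2.2 ++ PySem.List.pyRange (st.2.1 + step) (st.2.1 + q * step + 1) step)
          else st) (lt, 0, [0])
        res.insert lt fin.2.2) res) by
    rw [h lead_times PySem.Dict.empty hpre]
  intro lts
  induction lts with
  | nil => intro res _; rfl
  | cons lt rest ih =>
    intro res hp
    simp only [List.foldl_cons]
    have hone : ((∀ s ∈ steps.reverse, 0 < s) ∨ lt ≤ 0) := by
      rcases hp with h | h
      · exact Or.inl (fun t ht => h t (List.mem_reverse.mp ht))
      · exact Or.inr (h lt (List.mem_cons_self))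
    rw [pvInner_eq steps.reverse lt 0 [0] hone]
    apply ih
    rcases hp with h | h
    · exact Or.inl h
    · exact Or.inr (fun l hl => h l (List.mem_cons_of_mem _ hl))
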